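-- pv_equiv track=rewrite | github.com/Ais137/Recorder | topic/Captcha/一种朴素的人工滑动轨迹生成方案/src/artificial_trail_samples.py | build_offset_sequence
-- ===== SOURCE A (Python) =====
-- def build_offset_sequence(diff_sequence:list, start:list=None) -> list:
--     """构建偏移序列
--
--     基于 *间隔序列* 构建 *偏移序列*，[1, 1, 2, ...] -> [1, 2, 4, ...]，
--     该方法与 *build_diff_sequence* 互为逆操作。
--
--     Args:
--         * diff_sequence(list): 间隔序列
--         * start(list): 起始值
--
--     Returns:
--         (list): 偏移序列
--
--     Examples:
--         >>> diff_sequence = [[1, 1], [1, 1], [2, -1], [-1, 1], [3, -1]]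
--         >>> Trail.build_offset_sequence(diff_sequence)
--         [[0, 0], [1, 1], [2, 2], [4, 1], [3, 2], [6, 1]]
--     """
--     dim = len(diff_sequence[0])
--     offset_sequence = [start or ([0] * dim)]
--     [
--         offset_sequence.append([offset_sequence[i][n]+diff_sequence[i][n] for n in range(dim)])
--         for i in range(len(diff_sequence))
--     ]
--     return offset_sequence
-- ===== SOURCE B (Python) =====
-- def build_offset_sequence(diff_sequence: list, start: list = None) -> list:
--     """Column-wise prefix sums: one running scalar per dimension, then zip the
--     columns back into rows. Same return value as the row-wise original."""
--     dim = len(diff_sequence[0])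
--     s = start or ([0] * dim)
--     cols = []
--     for n in range(dim):
--         acc = s[n]
--         col = []
--         for row in diff_sequence:
--             acc = acc + row[n]
--             col.append(acc)
--         cols.append(col)
--     return [s] + [[col[i] for col in cols] for i in range(len(diff_sequence))]
-- ===== Notes on version B (the rewrite author's own statement) =====
-- stated objective: alternative
-- what changed: Computes the prefix sum column-by-column with one running scalar per dimension and then assembles the output rows by index from the columns, instead of building each row from the previous output row.
import Mathlib
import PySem

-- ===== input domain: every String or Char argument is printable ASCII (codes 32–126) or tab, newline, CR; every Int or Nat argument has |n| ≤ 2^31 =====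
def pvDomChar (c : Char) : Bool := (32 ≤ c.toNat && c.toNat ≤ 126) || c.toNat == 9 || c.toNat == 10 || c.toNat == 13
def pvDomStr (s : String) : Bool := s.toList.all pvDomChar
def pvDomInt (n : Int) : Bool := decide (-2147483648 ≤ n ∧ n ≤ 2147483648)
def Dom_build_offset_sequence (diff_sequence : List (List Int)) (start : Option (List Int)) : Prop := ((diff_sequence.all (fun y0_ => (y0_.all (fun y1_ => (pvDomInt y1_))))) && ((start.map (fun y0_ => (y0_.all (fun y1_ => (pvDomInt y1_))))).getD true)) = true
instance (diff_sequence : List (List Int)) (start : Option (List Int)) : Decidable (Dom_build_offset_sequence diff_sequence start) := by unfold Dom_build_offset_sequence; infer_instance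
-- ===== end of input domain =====

-- B computes the prefix sums column-by-column (one running scalar per dimension, then assembles
-- rows by index from the columns) instead of A's row-by-row pass; same return value (alternative).

-- ===== PORT A =====
-- row-wise: append to offset_sequence the previous row plus the current diff row
def build_offset_sequence (diff_sequence : List (List Int)) (start : Option (List Int)) : List (List Int) :=
  let dim := (PySem.List.pyGetD diff_sequence 0 []).length
  let s0 : List Int :=
    match start with
    | none => List.replicate dim 0
    | some s => if s.isEmpty then List.replicate dim 0 else s
  (List.range diff_sequence.length).foldl
    (fun off (i : Nat) =>
      off ++ [(List.range dim).map (fun (n : Nat) =>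
        PySem.List.pyGetD (PySem.List.pyGetD off (i : Int) []) (n : Int) 0
        + PySem.List.pyGetD (PySem.List.pyGetD diff_sequence (i : Int) []) (n : Int) 0)])
    [s0]

-- ===== PORT B =====
-- column-wise: one running scalar per dimension, then assemble rows by index from the columns
def build_offset_sequence_alt (diff_sequence : List (List Int)) (start : Option (List Int)) : List (List Int) :=
  let dim := (PySem.List.pyGetD diff_sequence 0 []).length
  let s : List Int :=
    match start with
    | none => List.replicate dim 0
    | some s0 => if s0.isEmpty then List.replicate dim 0 else s0
  let cols : List (List Int) := (List.range dim).map (fun (n : Nat) =>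
    (diff_sequence.foldl
      (fun (p : Int × List Int) row =>
        let acc := p.1 + PySem.List.pyGetD row (n : Int) 0
        (acc, p.2 ++ [acc]))
      (PySem.List.pyGetD s (n : Int) 0, ([] : List Int))).2)
  s :: (List.range diff_sequence.length).map (fun (i : Nat) =>
    cols.map (fun c => PySem.List.pyGetD c (i : Int) 0))

-- ===== PRECONDITION & SPEC =====
-- Pre_ excludes exactly the inputs where Python A raises IndexError: empty diff_sequence,
-- a diff row shorter than dim, or a truthy start shorter than dim.
def Pre_build_offset_sequence (diff_sequence : List (List Int)) (start : Option (List Int)) : Prop :=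
  diff_sequence ≠ [] ∧
  (∀ r ∈ diff_sequence, (diff_sequence.headD []).length ≤ r.length) ∧
  (∀ s ∈ start.toList, s = [] ∨ (diff_sequence.headD []).length ≤ s.length)
instance (diff_sequence : List (List Int)) (start : Option (List Int)) : Decidable (Pre_build_offset_sequence diff_sequence start) := by unfold Pre_build_offset_sequence; infer_instance
def pvWitness_build_offset_sequence : List (List Int) × Option (List Int) := ([[1, 1], [2, -1]], some [0, 0])

def Spec_build_offset_sequence (diff_sequence : List (List Int)) (start : Option (List Int)) (out : List (List Int)) : Prop := out = build_offset_sequence_alt diff_sequence start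
instance (diff_sequence : List (List Int)) (start : Option (List Int)) (out : List (List Int)) : Decidable (Spec_build_offset_sequence diff_sequence start out) := by unfold Spec_build_offset_sequence; infer_instance

-- ===== CLAIM (what is proved, stated in full; the proofs are below) =====
def Claim_equal_build_offset_sequence : Prop := ∀ (diff_sequence : List (List Int)) (start : Option (List Int)), Dom_build_offset_sequence diff_sequence start → Pre_build_offset_sequence diff_sequence start → Spec_build_offset_sequence diff_sequence start (build_offset_sequence diff_sequence start)

-- ===== LEMMAS AND PROOFS =====

-- the common reference: one prefix-sum step truncated to dim, and the whole chain of rows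
def vstep (dim : Nat) (v d : List Int) : List Int :=
  (List.range dim).map (fun (n : Nat) => v.getD n 0 + d.getD n 0)

def chain (dim : Nat) (v : List Int) : List (List Int) → List (List Int)
  | [] => []
  | d :: t => vstep dim v d :: chain dim (vstep dim v d) t

theorem chain_length (dim : Nat) : ∀ (ds : List (List Int)) (v : List Int),
    (chain dim v ds).length = ds.length := by
  intro ds
  induction ds with
  | nil => intro v; rfl
  | cons d t ih => intro v; simp [chain, ih]

theorem lastD_cons {α : Type} (a d : α) (l : List α) : (a :: l).getLastD d = l.getLastD a := by
  cases l <;> rfl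

theorem chain_append (dim : Nat) : ∀ (l : List (List Int)) (v d : List Int),
    chain dim v (l ++ [d]) = chain dim v l ++ [vstep dim ((chain dim v l).getLastD v) d] := by
  intro l
  induction l with
  | nil => intro v d; simp [chain]
  | cons a t ih =>
    intro v d
    rw [List.cons_append,
      show chain dim v (a :: (t ++ [d])) = vstep dim v a :: chain dim (vstep dim v a) (t ++ [d]) from rfl,
      ih,
      show chain dim v (a :: t) = vstep dim v a :: chain dim (vstep dim v a) t from rfl,
      lastD_cons]
    simp

theorem getD_len_cons {α : Type} : ∀ (c : List α) (s d : α), (s :: c).getD c.length d = c.getLastD s := by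
  intro c
  induction c with
  | nil => intro s d; rfl
  | cons a t ih =>
    intro s d
    simp only [List.length_cons, List.getD_cons_succ]
    rw [lastD_cons]
    exact ih a d

theorem foldA (dim : Nat) (ds : List (List Int)) (s : List Int) :
    ∀ k, k ≤ ds.length →
    (List.range k).foldl
      (fun off (i : Nat) =>
        off ++ [(List.range dim).map (fun (n : Nat) =>
          PySem.List.pyGetD (PySem.List.pyGetD off (i : Int) []) (n : Int) 0
          + PySem.List.pyGetD (PySem.List.pyGetD ds (i : Int) []) (n : Int) 0)])
      [s]
    = s :: chain dim s (ds.take k) := by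
  intro k
  induction k with
  | zero => intro _; simp [chain]
  | succ k ih =>
    intro hk
    have hk' : k ≤ ds.length := Nat.le_of_succ_le hk
    have hklt : k < ds.length := hk
    rw [List.range_succ, List.foldl_append, ih hk']
    have hlen : (chain dim s (ds.take k)).length = k := by
      rw [chain_length, List.length_take]; omega
    have hoff : PySem.List.pyGetD (s :: chain dim s (ds.take k)) (k : Int) []
        = (chain dim s (ds.take k)).getLastD s := by
      rw [PySem.List.pyGetD_natCast]
      have h := getD_len_cons (chain dim s (ds.take k)) s []
      rwa [hlen] at h
    have hds : PySem.List.pyGetD ds (k : Int) [] = ds[k] := by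
      rw [PySem.List.pyGetD_natCast, List.getD_eq_getElem _ _ hklt]
    have htake : ds.take (k + 1) = ds.take k ++ [ds[k]] := by
      rw [List.take_add_one]
      simp [List.getElem?_eq_getElem hklt]
    rw [List.foldl_cons, List.foldl_nil, hoff, hds, htake, chain_append]
    have : (List.range dim).map (fun (n : Nat) =>
        PySem.List.pyGetD ((chain dim s (ds.take k)).getLastD s) (n : Int) 0
        + PySem.List.pyGetD ds[k] (n : Int) 0)
        = vstep dim ((chain dim s (ds.take k)).getLastD s) ds[k] := by
      unfold vstep
      refine List.map_congr_left ?_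
      intro n _
      rw [PySem.List.pyGetD_natCast, PySem.List.pyGetD_natCast]
    rw [this]
    simp

theorem vstep_getD (dim n : Nat) (hn : n < dim) (v d : List Int) :
    (vstep dim v d).getD n 0 = v.getD n 0 + d.getD n 0 :=
  PySem.List.getD_map_range _ _ _ _ hn

theorem foldB (dim n : Nat) (hn : n < dim) :
    ∀ (ds : List (List Int)) (v : List Int) (pre : List Int),
    (ds.foldl
      (fun (p : Int × List Int) row =>
        (p.1 + PySem.List.pyGetD row (n : Int) 0, p.2 ++ [p.1 + PySem.List.pyGetD row (n : Int) 0]))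
      (v.getD n 0, pre)).2
    = pre ++ (chain dim v ds).map (fun r => r.getD n 0) := by
  intro ds
  induction ds with
  | nil => intro v pre; simp [chain]
  | cons d t ih =>
    intro v pre
    rw [List.foldl_cons]
    have h1 : v.getD n 0 + PySem.List.pyGetD d (n : Int) 0 = (vstep dim v d).getD n 0 := by
      rw [PySem.List.pyGetD_natCast, vstep_getD dim n hn]
    rw [h1, ih (vstep dim v d) (pre ++ [(vstep dim v d).getD n 0])]
    simp [chain]

theorem chain_shape (dim : Nat) : ∀ (ds : List (List Int)) (v : List Int),
    ∀ r ∈ chain dim v ds, ∃ v' d', r = vstep dim v' d' := by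
  intro ds
  induction ds with
  | nil => intro v r hr; simp [chain] at hr
  | cons d t ih =>
    intro v r hr
    simp only [chain, List.mem_cons] at hr
    rcases hr with h | h
    · exact ⟨v, d, h⟩
    · exact ih (vstep dim v d) r h

theorem row_rebuild (dim : Nat) (v d : List Int) :
    (List.range dim).map (fun (n : Nat) => (vstep dim v d).getD n 0) = vstep dim v d := by
  have : (List.range dim).map (fun (n : Nat) => (vstep dim v d).getD n 0)
      = (List.range dim).map (fun (n : Nat) => v.getD n 0 + d.getD n 0) := by
    refine List.map_congr_left ?_
    intro n hn
    exact vstep_getD dim n (List.mem_range.mp hn) v d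
  rw [this]; rfl

theorem B_eq (ds : List (List Int)) (s : List Int) (dim : Nat) :
    (s :: (List.range ds.length).map (fun (i : Nat) =>
      ((List.range dim).map (fun (n : Nat) =>
        (ds.foldl
          (fun (p : Int × List Int) row =>
            (p.1 + PySem.List.pyGetD row (n : Int) 0, p.2 ++ [p.1 + PySem.List.pyGetD row (n : Int) 0]))
          (PySem.List.pyGetD s (n : Int) 0, ([] : List Int))).2)).map
        (fun c => PySem.List.pyGetD c (i : Int) 0)))
    = s :: chain dim s ds := by
  have hcol : ∀ n : Nat, n < dim →
      (ds.foldl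
        (fun (p : Int × List Int) row =>
          (p.1 + PySem.List.pyGetD row (n : Int) 0, p.2 ++ [p.1 + PySem.List.pyGetD row (n : Int) 0]))
        (PySem.List.pyGetD s (n : Int) 0, ([] : List Int))).2
      = (chain dim s ds).map (fun r => r.getD n 0) := by
    intro n hn
    rw [PySem.List.pyGetD_natCast]
    simpa using foldB dim n hn ds s []
  congr 1
  apply List.ext_getElem
  · simp [chain_length]
  · intro i h1 h2
    simp only [List.getElem_map, List.getElem_range]
    have hi : i < ds.length := by simpa using h1
    have hic : i < (chain dim s ds).length := by rwa [chain_length]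
    have hrow : ∀ n : Nat, n < dim →
        PySem.List.pyGetD ((chain dim s ds).map (fun r => r.getD n 0)) (i : Int) 0
        = ((chain dim s ds)[i]).getD n 0 := by
      intro n hn
      rw [PySem.List.pyGetD_natCast, List.getD_eq_getElem _ _ (by simpa [chain_length] using hi),
        List.getElem_map]
    have : ((List.range dim).map (fun (n : Nat) =>
        (ds.foldl
          (fun (p : Int × List Int) row =>
            (p.1 + PySem.List.pyGetD row (n : Int) 0, p.2 ++ [p.1 + PySem.List.pyGetD row (n : Int) 0]))
          (PySem.List.pyGetD s (n : Int) 0, ([] : List Int))).2)).map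
        (fun c => PySem.List.pyGetD c (i : Int) 0)
        = (List.range dim).map (fun (n : Nat) => ((chain dim s ds)[i]).getD n 0) := by
      rw [List.map_map]
      refine List.map_congr_left ?_
      intro n hn
      have hn' := List.mem_range.mp hn
      simp only [Function.comp]
      rw [hcol n hn', hrow n hn']
    rw [this]
    obtain ⟨v', d', hvd⟩ := chain_shape dim ds s _ (List.getElem_mem hic)
    rw [hvd, row_rebuild]

-- ===== VERDICT (by name: the statement is the Claim_ definition above) =====
theorem build_offset_sequence_spec : Claim_equal_build_offset_sequence := by
  intro ds start _hdom _hpre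
  show build_offset_sequence ds start = build_offset_sequence_alt ds start
  simp only [build_offset_sequence, build_offset_sequence_alt]
  rw [foldA ((PySem.List.pyGetD ds 0 []).length) ds _ ds.length (Nat.le_refl _), List.take_length]
  rw [B_eq]
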